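-- pv_equiv track=rewrite | github.com/adkinsd2261/javlin-memory | main.py | calculate_importance_score
-- ===== SOURCE A (Python) =====
-- def calculate_importance_score(topic, input_text, output_text, category, type_):
--     """Calculate importance score (0-100) for memory significance"""
--     score = 0
--
--     # Impact scoring (0-30)
--     impact_keywords = ['fix', 'resolved', 'completed', 'deployed', 'milestone', 'breakthrough']
--     if any(keyword in (input_text + output_text).lower() for keyword in impact_keywords):
--         score += 25
--     elif 'success' in (input_text + output_text).lower():
--         score += 15
--     elif 'test' in (input_text + output_text).lower():
--         score += 10
--
--     # Resolution scoring (0-20)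
--     resolution_keywords = ['solution', 'answer', 'resolved', 'fixed', 'working']
--     if any(keyword in output_text.lower() for keyword in resolution_keywords):
--         score += 20
--     elif 'completed' in output_text.lower():
--         score += 15
--
--     # Novelty scoring (0-20)
--     novelty_keywords = ['new', 'first', 'initial', 'created', 'implemented', 'added']
--     if any(keyword in (input_text + output_text).lower() for keyword in novelty_keywords):
--         score += 15
--
--     # Emotion/significance indicators (0-20)
--     emotion_keywords = ['important', 'critical', 'urgent', 'major', 'significant', 'breakthrough']
--     if any(keyword in (input_text + output_text).lower() for keyword in emotion_keywords):
--         score += 20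
--     elif any(keyword in topic.lower() for keyword in emotion_keywords):
--         score += 15
--
--     # Reflection/learning (0-10)
--     reflection_keywords = ['learned', 'insight', 'understand', 'realize', 'discovered']
--     if any(keyword in (input_text + output_text).lower() for keyword in reflection_keywords):
--         score += 10
--
--     # Always prioritize certain types
--     priority_types = ['BugFix', 'Insight', 'BuildLog', 'Decision', 'Emotion']
--     if type_ in priority_types:
--         score += 20
--
--     # Category bonuses
--     if category in ['system', 'integration', 'Infrastructure']:
--         score += 10
--
--     return min(score, 100)
-- ===== SOURCE B (Python) =====
-- def _best(candidates):
--     """Highest weight among keywords actually present in their text (0 if none)."""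
--     return max((pts for text, kw, pts in candidates if kw in text), default=0)
--
--
-- def calculate_importance_score(topic, input_text, output_text, category, type_):
--     """Calculate importance score (0-100) for memory significance"""
--     combined = (input_text + output_text).lower()
--     out = output_text.lower()
--     top = topic.lower()
--     emotion = ('important', 'critical', 'urgent', 'major', 'significant', 'breakthrough')
--     # Each dimension is a flat bag of (text, keyword, weight) candidates; its
--     # contribution is the MAX weight among matches.  This equals the original
--     # tiered first-match rules because weights strictly decrease across tiers.
--     groups = [
--         [(combined, kw, 25) for kw in ('fix', 'resolved', 'completed', 'deployed', 'milestone', 'breakthrough')]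
--         + [(combined, 'success', 15), (combined, 'test', 10)],
--         [(out, kw, 20) for kw in ('solution', 'answer', 'resolved', 'fixed', 'working')]
--         + [(out, 'completed', 15)],
--         [(combined, kw, 15) for kw in ('new', 'first', 'initial', 'created', 'implemented', 'added')],
--         [(combined, kw, 20) for kw in emotion] + [(top, kw, 15) for kw in emotion],
--         [(combined, kw, 10) for kw in ('learned', 'insight', 'understand', 'realize', 'discovered')],
--     ]
--     score = sum(_best(g) for g in groups)
--     score += 20 * (type_ in ('BugFix', 'Insight', 'BuildLog', 'Decision', 'Emotion'))
--     score += 10 * (category in ('system', 'integration', 'Infrastructure'))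
--     return min(score, 100)
-- ===== Notes on version B (the rewrite author's own statement) =====
-- stated objective: alternative
-- what changed: Replaced the tiered first-match if/elif ladders by per-keyword weighted candidates: each dimension is a flat bag of (text, keyword, weight) triples and contributes the MAX weight among matching candidates (order-independent, no break/elif), with the flat type/category bonuses done by boolean arithmetic; this is correct because weights strictly decrease across the original tiers.
import Mathlib
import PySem

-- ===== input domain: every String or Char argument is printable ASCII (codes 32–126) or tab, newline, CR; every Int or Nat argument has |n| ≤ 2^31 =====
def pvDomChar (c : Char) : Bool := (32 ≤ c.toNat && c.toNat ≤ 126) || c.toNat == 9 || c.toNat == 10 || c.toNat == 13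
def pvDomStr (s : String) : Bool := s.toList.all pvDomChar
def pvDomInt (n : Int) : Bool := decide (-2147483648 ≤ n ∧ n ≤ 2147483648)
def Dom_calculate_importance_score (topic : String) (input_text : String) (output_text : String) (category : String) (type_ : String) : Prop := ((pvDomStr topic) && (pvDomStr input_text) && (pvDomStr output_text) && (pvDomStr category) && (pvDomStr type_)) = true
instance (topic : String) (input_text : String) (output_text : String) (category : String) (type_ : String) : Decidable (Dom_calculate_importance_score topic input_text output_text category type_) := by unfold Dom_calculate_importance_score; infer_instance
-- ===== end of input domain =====

-- B replaces A's tiered if/elif ladders by flat bags of per-keyword weighted candidates,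
-- each dimension contributing the MAX matching weight (objective: alternative, same cost).

-- ===== PORT A =====
def calculate_importance_score (topic : String) (input_text : String) (output_text : String) (category : String) (type_ : String) : Int :=
  let score : Int := 0
  -- Impact scoring (0-30)
  let impact_keywords := ["fix", "resolved", "completed", "deployed", "milestone", "breakthrough"]
  let score :=
    if impact_keywords.any (fun keyword => PySem.Str.isIn keyword (PySem.Str.lower (input_text ++ output_text))) then score + 25
    else if PySem.Str.isIn "success" (PySem.Str.lower (input_text ++ output_text)) then score + 15
    else if PySem.Str.isIn "test" (PySem.Str.lower (input_text ++ output_text)) then score + 10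
    else score
  -- Resolution scoring (0-20)
  let resolution_keywords := ["solution", "answer", "resolved", "fixed", "working"]
  let score :=
    if resolution_keywords.any (fun keyword => PySem.Str.isIn keyword (PySem.Str.lower output_text)) then score + 20
    else if PySem.Str.isIn "completed" (PySem.Str.lower output_text) then score + 15
    else score
  -- Novelty scoring (0-20)
  let novelty_keywords := ["new", "first", "initial", "created", "implemented", "added"]
  let score :=
    if novelty_keywords.any (fun keyword => PySem.Str.isIn keyword (PySem.Str.lower (input_text ++ output_text))) then score + 15
    else score
  -- Emotion/significance indicators (0-20)
  let emotion_keywords := ["important", "critical", "urgent", "major", "significant", "breakthrough"]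
  let score :=
    if emotion_keywords.any (fun keyword => PySem.Str.isIn keyword (PySem.Str.lower (input_text ++ output_text))) then score + 20
    else if emotion_keywords.any (fun keyword => PySem.Str.isIn keyword (PySem.Str.lower topic)) then score + 15
    else score
  -- Reflection/learning (0-10)
  let reflection_keywords := ["learned", "insight", "understand", "realize", "discovered"]
  let score :=
    if reflection_keywords.any (fun keyword => PySem.Str.isIn keyword (PySem.Str.lower (input_text ++ output_text))) then score + 10
    else score
  -- Always prioritize certain types
  let priority_types := ["BugFix", "Insight", "BuildLog", "Decision", "Emotion"]
  let score := if priority_types.contains type_ then score + 20 else score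
  -- Category bonuses
  let score := if ["system", "integration", "Infrastructure"].contains category then score + 10 else score
  min score 100

-- ===== PORT B =====
-- _best: highest weight among candidates (text, kw, pts) whose kw occurs in text, 0 if none
def pvBest : List (String × String × Int) → Int
  | [] => 0
  | (t, k, p) :: rest => if PySem.Str.isIn k t then max p (pvBest rest) else pvBest rest

def calculate_importance_score_alt (topic : String) (input_text : String) (output_text : String) (category : String) (type_ : String) : Int :=
  let combined := PySem.Str.lower (input_text ++ output_text)
  let out := PySem.Str.lower output_text
  let top := PySem.Str.lower topic
  let emotion := ["important", "critical", "urgent", "major", "significant", "breakthrough"]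
  let groups : List (List (String × String × Int)) :=
    [ (["fix", "resolved", "completed", "deployed", "milestone", "breakthrough"].map (fun kw => (combined, kw, (25 : Int))))
        ++ [(combined, "success", 15), (combined, "test", 10)],
      (["solution", "answer", "resolved", "fixed", "working"].map (fun kw => (out, kw, (20 : Int))))
        ++ [(out, "completed", 15)],
      ["new", "first", "initial", "created", "implemented", "added"].map (fun kw => (combined, kw, (15 : Int))),
      (emotion.map (fun kw => (combined, kw, (20 : Int))))
        ++ (emotion.map (fun kw => (top, kw, (15 : Int)))),
      ["learned", "insight", "understand", "realize", "discovered"].map (fun kw => (combined, kw, (10 : Int))) ]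
  let score := groups.foldl (fun s g => s + pvBest g) 0
  let score := score + 20 * (if ["BugFix", "Insight", "BuildLog", "Decision", "Emotion"].contains type_ then (1 : Int) else 0)
  let score := score + 10 * (if ["system", "integration", "Infrastructure"].contains category then (1 : Int) else 0)
  min score 100

-- ===== PRECONDITION & SPEC =====
def Spec_calculate_importance_score (topic : String) (input_text : String) (output_text : String) (category : String) (type_ : String) (out : Int) : Prop := out = calculate_importance_score_alt topic input_text output_text category type_
instance (topic : String) (input_text : String) (output_text : String) (category : String) (type_ : String) (out : Int) : Decidable (Spec_calculate_importance_score topic input_text output_text category type_ out) := by unfold Spec_calculate_importance_score; infer_instance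

-- ===== CLAIM (what is proved, stated in full; the proofs are below) =====
def Claim_equal_calculate_importance_score : Prop := ∀ (topic : String) (input_text : String) (output_text : String) (category : String) (type_ : String), Dom_calculate_importance_score topic input_text output_text category type_ → Spec_calculate_importance_score topic input_text output_text category type_ (calculate_importance_score topic input_text output_text category type_)

-- ===== LEMMAS AND PROOFS =====

lemma pvBest_append (l1 l2 : List (String × String × Int)) (h2 : 0 ≤ pvBest l2) :
    pvBest (l1 ++ l2) = max (pvBest l1) (pvBest l2) := by
  induction l1 with
  | nil => simp [pvBest]; omega
  | cons a rest ih =>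
    obtain ⟨t, k, p⟩ := a
    simp only [List.cons_append, pvBest, ih]
    split_ifs <;> omega

lemma pvBest_uniform (t : String) (p : Int) (hp : 0 ≤ p) (ks : List String) :
    pvBest (ks.map (fun k => (t, k, p))) = if ks.any (fun k => PySem.Str.isIn k t) then p else 0 := by
  induction ks with
  | nil => simp [pvBest]
  | cons k rest ih =>
    simp only [List.map_cons, pvBest, List.any_cons, ih]
    by_cases h : PySem.Str.isIn k t = true
    · simp only [h, Bool.true_or, if_true]
      split_ifs <;> omega
    · simp only [Bool.not_eq_true] at h
      simp only [h, Bool.false_or, Bool.false_eq_true, if_false]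

-- A's tiered elif ladder, abstracted over the eleven keyword/membership tests
def pvLadder (c1 c2 c3 d1 d2 n1 e1 e2 r1 t1 g1 : Bool) : Int :=
  let score : Int := 0
  let score := if c1 then score + 25 else if c2 then score + 15 else if c3 then score + 10 else score
  let score := if d1 then score + 20 else if d2 then score + 15 else score
  let score := if n1 then score + 15 else score
  let score := if e1 then score + 20 else if e2 then score + 15 else score
  let score := if r1 then score + 10 else score
  let score := if t1 then score + 20 else score
  let score := if g1 then score + 10 else score
  min score 100

-- B's sum of per-group maxima, abstracted over the same tests
def pvMaxSum (c1 c2 c3 d1 d2 n1 e1 e2 r1 t1 g1 : Bool) : Int :=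
  let b1 : Int := max (if c1 then 25 else 0)
    (if c2 then max 15 (if c3 then max 10 0 else 0) else if c3 then max 10 0 else 0)
  let b2 : Int := max (if d1 then 20 else 0) (if d2 then max 15 0 else 0)
  let b3 : Int := if n1 then 15 else 0
  let b4 : Int := max (if e1 then 20 else 0) (if e2 then 15 else 0)
  let b5 : Int := if r1 then 10 else 0
  let s := ((((0 + b1) + b2) + b3) + b4) + b5
  let s := s + 20 * (if t1 then (1 : Int) else 0)
  let s := s + 10 * (if g1 then (1 : Int) else 0)
  min s 100

lemma pv_a_eval (topic input_text output_text category type_ : String) :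
    calculate_importance_score topic input_text output_text category type_ =
    pvLadder
      (["fix", "resolved", "completed", "deployed", "milestone", "breakthrough"].any
        (fun keyword => PySem.Str.isIn keyword (PySem.Str.lower (input_text ++ output_text))))
      (PySem.Str.isIn "success" (PySem.Str.lower (input_text ++ output_text)))
      (PySem.Str.isIn "test" (PySem.Str.lower (input_text ++ output_text)))
      (["solution", "answer", "resolved", "fixed", "working"].any
        (fun keyword => PySem.Str.isIn keyword (PySem.Str.lower output_text)))
      (PySem.Str.isIn "completed" (PySem.Str.lower output_text))
      (["new", "first", "initial", "created", "implemented", "added"].any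
        (fun keyword => PySem.Str.isIn keyword (PySem.Str.lower (input_text ++ output_text))))
      (["important", "critical", "urgent", "major", "significant", "breakthrough"].any
        (fun keyword => PySem.Str.isIn keyword (PySem.Str.lower (input_text ++ output_text))))
      (["important", "critical", "urgent", "major", "significant", "breakthrough"].any
        (fun keyword => PySem.Str.isIn keyword (PySem.Str.lower topic)))
      (["learned", "insight", "understand", "realize", "discovered"].any
        (fun keyword => PySem.Str.isIn keyword (PySem.Str.lower (input_text ++ output_text))))
      (["BugFix", "Insight", "BuildLog", "Decision", "Emotion"].contains type_)
      (["system", "integration", "Infrastructure"].contains category) := rfl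

lemma pv_alt_eval (topic input_text output_text category type_ : String) :
    calculate_importance_score_alt topic input_text output_text category type_ =
    pvMaxSum
      (["fix", "resolved", "completed", "deployed", "milestone", "breakthrough"].any
        (fun keyword => PySem.Str.isIn keyword (PySem.Str.lower (input_text ++ output_text))))
      (PySem.Str.isIn "success" (PySem.Str.lower (input_text ++ output_text)))
      (PySem.Str.isIn "test" (PySem.Str.lower (input_text ++ output_text)))
      (["solution", "answer", "resolved", "fixed", "working"].any
        (fun keyword => PySem.Str.isIn keyword (PySem.Str.lower output_text)))
      (PySem.Str.isIn "completed" (PySem.Str.lower output_text))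
      (["new", "first", "initial", "created", "implemented", "added"].any
        (fun keyword => PySem.Str.isIn keyword (PySem.Str.lower (input_text ++ output_text))))
      (["important", "critical", "urgent", "major", "significant", "breakthrough"].any
        (fun keyword => PySem.Str.isIn keyword (PySem.Str.lower (input_text ++ output_text))))
      (["important", "critical", "urgent", "major", "significant", "breakthrough"].any
        (fun keyword => PySem.Str.isIn keyword (PySem.Str.lower topic)))
      (["learned", "insight", "understand", "realize", "discovered"].any
        (fun keyword => PySem.Str.isIn keyword (PySem.Str.lower (input_text ++ output_text))))
      (["BugFix", "Insight", "BuildLog", "Decision", "Emotion"].contains type_)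
      (["system", "integration", "Infrastructure"].contains category) := by
  unfold calculate_importance_score_alt
  simp only [List.foldl_cons, List.foldl_nil]
  rw [pvBest_append _ _ (by simp only [pvBest]; split_ifs <;> omega),
      pvBest_append _ _ (by simp only [pvBest]; split_ifs <;> omega),
      pvBest_append _ _ (by rw [pvBest_uniform _ _ (by norm_num)]; split_ifs <;> norm_num),
      pvBest_uniform _ _ (by norm_num), pvBest_uniform _ _ (by norm_num),
      pvBest_uniform _ _ (by norm_num), pvBest_uniform _ _ (by norm_num),
      pvBest_uniform _ _ (by norm_num), pvBest_uniform _ _ (by norm_num)]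
  simp only [pvBest]
  rfl

lemma pv_key : ∀ (c1 c2 c3 d1 d2 n1 e1 e2 r1 t1 g1 : Bool),
    pvLadder c1 c2 c3 d1 d2 n1 e1 e2 r1 t1 g1 = pvMaxSum c1 c2 c3 d1 d2 n1 e1 e2 r1 t1 g1 := by
  decide

-- ===== VERDICT (by name: the statement is the Claim_ definition above) =====
theorem calculate_importance_score_spec : Claim_equal_calculate_importance_score := by
  intro topic input_text output_text category type_ _
  unfold Spec_calculate_importance_score
  rw [pv_a_eval, pv_alt_eval]
  exact pv_key _ _ _ _ _ _ _ _ _ _ _
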